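-- pv_equiv track=rewrite | github.com/Johnobhoy88/loki-interceptor | backend/compliance/gdpr/privacy_notice.py | _is_element_required
-- ===== SOURCE A (Python) =====
-- def _is_element_required(element_name: str, text_lower: str) -> bool:
--     """Check if element is contextually required"""
--     # Always required elements
--     always_required = [
--         'controller_identity', 'contact_details', 'purposes',
--         'lawful_basis', 'retention_period', 'data_subject_rights',
--         'right_to_complain'
--     ]
--
--     if element_name in always_required:
--         return True
--
--     # Conditionally required elements
--     if element_name == 'dpo_contact':
--         # Required if DPO mentioned anywhere
--         return 'dpo' in text_lower or 'data protection officer' in text_lower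
--
--     if element_name == 'legitimate_interests':
--         # Required if using legitimate interest
--         return 'legitimate interest' in text_lower
--
--     if element_name == 'recipients':
--         # Required if sharing/disclosing
--         return any(kw in text_lower for kw in ['share', 'disclose', 'third party', 'recipient'])
--
--     if element_name == 'international_transfers':
--         # Required if transferring internationally
--         return any(kw in text_lower for kw in ['international', 'outside', 'third country'])
--
--     if element_name == 'right_to_withdraw':
--         # Required if using consent
--         return 'consent' in text_lower
--
--     if element_name == 'automated_decisions':
--         # Required if using automated decisions
--         return any(kw in text_lower for kw in ['automated', 'profiling', 'algorithm'])
--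
--     return False
-- ===== SOURCE B (Python) =====
-- _ALWAYS = [
--     'controller_identity', 'contact_details', 'purposes',
--     'lawful_basis', 'retention_period', 'data_subject_rights',
--     'right_to_complain'
-- ]
--
-- # Flat (keyword, element) trigger pairs: a keyword occurring in the text
-- # makes its element required.
-- _TRIGGERS = [
--     ('dpo', 'dpo_contact'),
--     ('data protection officer', 'dpo_contact'),
--     ('legitimate interest', 'legitimate_interests'),
--     ('share', 'recipients'),
--     ('disclose', 'recipients'),
--     ('third party', 'recipients'),
--     ('recipient', 'recipients'),
--     ('international', 'international_transfers'),
--     ('outside', 'international_transfers'),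
--     ('third country', 'international_transfers'),
--     ('consent', 'right_to_withdraw'),
--     ('automated', 'automated_decisions'),
--     ('profiling', 'automated_decisions'),
--     ('algorithm', 'automated_decisions'),
-- ]
--
--
-- def _is_element_required(element_name: str, text_lower: str) -> bool:
--     """Inverted control flow: compute the full list of elements this text
--     requires (always-required ones plus every element whose trigger keyword
--     occurs), then answer by membership."""
--     required = list(_ALWAYS)
--     for kw, elem in _TRIGGERS:
--         if kw in text_lower:
--             required.append(elem)
--     return element_name in required
-- ===== Notes on version B (the rewrite author's own statement) =====
-- stated objective: alternative
-- what changed: B inverts the control flow: instead of dispatching on element_name through an if-ladder of per-name keyword checks, it scans one flat (keyword, element) trigger list against the text to build the complete list of required elements, then answers by membership of element_name in that list.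
import Mathlib
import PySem

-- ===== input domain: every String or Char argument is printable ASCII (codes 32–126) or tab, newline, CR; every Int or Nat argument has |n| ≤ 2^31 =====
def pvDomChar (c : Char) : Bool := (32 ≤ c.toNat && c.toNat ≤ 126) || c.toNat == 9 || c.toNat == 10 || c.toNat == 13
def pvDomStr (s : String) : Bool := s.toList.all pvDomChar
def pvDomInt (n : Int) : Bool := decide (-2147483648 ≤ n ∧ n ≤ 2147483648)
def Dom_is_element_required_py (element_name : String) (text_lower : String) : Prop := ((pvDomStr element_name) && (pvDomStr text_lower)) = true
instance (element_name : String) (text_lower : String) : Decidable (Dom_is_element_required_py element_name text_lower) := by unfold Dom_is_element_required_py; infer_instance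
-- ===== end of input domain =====

-- B inverts A's control flow: instead of dispatching on element_name through an if-ladder, it scans a flat (keyword, element) trigger list against the text to build the full list of required elements, then answers by membership; objective: alternative (same cost).

-- ===== PORT A =====
def is_element_required_py (element_name : String) (text_lower : String) : Bool :=
  let always_required := ["controller_identity", "contact_details", "purposes",
    "lawful_basis", "retention_period", "data_subject_rights", "right_to_complain"]
  if always_required.contains element_name then true
  else if element_name = "dpo_contact" then
    PySem.Str.isIn "dpo" text_lower || PySem.Str.isIn "data protection officer" text_lower
  else if element_name = "legitimate_interests" then
    PySem.Str.isIn "legitimate interest" text_lower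
  else if element_name = "recipients" then
    (["share", "disclose", "third party", "recipient"]).any (fun kw => PySem.Str.isIn kw text_lower)
  else if element_name = "international_transfers" then
    (["international", "outside", "third country"]).any (fun kw => PySem.Str.isIn kw text_lower)
  else if element_name = "right_to_withdraw" then
    PySem.Str.isIn "consent" text_lower
  else if element_name = "automated_decisions" then
    (["automated", "profiling", "algorithm"]).any (fun kw => PySem.Str.isIn kw text_lower)
  else false

-- ===== PORT B =====
def pvAlways : List String :=
  ["controller_identity", "contact_details", "purposes",
   "lawful_basis", "retention_period", "data_subject_rights", "right_to_complain"]

def pvTriggers : List (String × String) :=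
  [("dpo", "dpo_contact"),
   ("data protection officer", "dpo_contact"),
   ("legitimate interest", "legitimate_interests"),
   ("share", "recipients"),
   ("disclose", "recipients"),
   ("third party", "recipients"),
   ("recipient", "recipients"),
   ("international", "international_transfers"),
   ("outside", "international_transfers"),
   ("third country", "international_transfers"),
   ("consent", "right_to_withdraw"),
   ("automated", "automated_decisions"),
   ("profiling", "automated_decisions"),
   ("algorithm", "automated_decisions")]

-- B: build the full list of elements required by this text (always-required
-- plus every element whose trigger keyword occurs), then test membership.
def is_element_required_py_alt (element_name : String) (text_lower : String) : Bool :=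
  let required := pvTriggers.foldl
    (fun acc p => if PySem.Str.isIn p.1 text_lower then acc ++ [p.2] else acc) pvAlways
  required.contains element_name

-- ===== PRECONDITION & SPEC =====
def Spec_is_element_required_py (element_name : String) (text_lower : String) (out : Bool) : Prop := out = is_element_required_py_alt element_name text_lower
instance (element_name : String) (text_lower : String) (out : Bool) : Decidable (Spec_is_element_required_py element_name text_lower out) := by unfold Spec_is_element_required_py; infer_instance

-- ===== CLAIM (what is proved, stated in full; the proofs are below) =====
def Claim_equal_is_element_required_py : Prop := ∀ (element_name : String) (text_lower : String), Dom_is_element_required_py element_name text_lower → Spec_is_element_required_py element_name text_lower (is_element_required_py element_name text_lower)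

-- ===== LEMMAS AND PROOFS =====

-- Membership in B's accumulated list: the always-list part or some matching trigger.
theorem contains_trigger_foldl (x text : String) :
    ∀ (l : List (String × String)) (acc : List String),
    (l.foldl (fun acc p => if PySem.Str.isIn p.1 text then acc ++ [p.2] else acc) acc).contains x
      = (acc.contains x || l.any (fun p => PySem.Str.isIn p.1 text && p.2 == x)) := by
  intro l
  induction l with
  | nil => intro acc; simp
  | cons p rest ih =>
    intro acc
    simp only [List.foldl_cons, List.any_cons]
    by_cases h : PySem.Str.isIn p.1 text = true
    · rw [if_pos h, ih, h]
      simp only [List.contains_append, Bool.true_and, Bool.or_assoc]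
      rw [show ([p.2].contains x) = (p.2 == x) by simp [BEq.comm, beq_eq_decide]]
    · rw [if_neg h, ih, eq_false_of_ne_true h]
      simp

-- ===== VERDICT (by name: the statement is the Claim_ definition above) =====
theorem is_element_required_py_spec : Claim_equal_is_element_required_py := by
  intro element_name text_lower _
  unfold Spec_is_element_required_py
  unfold is_element_required_py_alt
  rw [contains_trigger_foldl]
  by_cases h0 : element_name = "controller_identity"
  · subst h0; simp [is_element_required_py, pvAlways]
  by_cases h1 : element_name = "contact_details"
  · subst h1; simp [is_element_required_py, pvAlways]
  by_cases h2 : element_name = "purposes"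
  · subst h2; simp [is_element_required_py, pvAlways]
  by_cases h3 : element_name = "lawful_basis"
  · subst h3; simp [is_element_required_py, pvAlways]
  by_cases h4 : element_name = "retention_period"
  · subst h4; simp [is_element_required_py, pvAlways]
  by_cases h5 : element_name = "data_subject_rights"
  · subst h5; simp [is_element_required_py, pvAlways]
  by_cases h6 : element_name = "right_to_complain"
  · subst h6; simp [is_element_required_py, pvAlways]
  by_cases h7 : element_name = "dpo_contact"
  · subst h7; simp [is_element_required_py, pvAlways, pvTriggers]
  by_cases h8 : element_name = "legitimate_interests"
  · subst h8; simp [is_element_required_py, pvAlways, pvTriggers]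
  by_cases h9 : element_name = "recipients"
  · subst h9; simp [is_element_required_py, pvAlways, pvTriggers]
  by_cases h10 : element_name = "international_transfers"
  · subst h10; simp [is_element_required_py, pvAlways, pvTriggers]
  by_cases h11 : element_name = "right_to_withdraw"
  · subst h11; simp [is_element_required_py, pvAlways, pvTriggers]
  by_cases h12 : element_name = "automated_decisions"
  · subst h12; simp [is_element_required_py, pvAlways, pvTriggers]
  · have h7' : ¬("dpo_contact" = element_name) := fun h => h7 h.symm
    have h8' : ¬("legitimate_interests" = element_name) := fun h => h8 h.symm
    have h9' : ¬("recipients" = element_name) := fun h => h9 h.symm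
    have h10' : ¬("international_transfers" = element_name) := fun h => h10 h.symm
    have h11' : ¬("right_to_withdraw" = element_name) := fun h => h11 h.symm
    have h12' : ¬("automated_decisions" = element_name) := fun h => h12 h.symm
    simp [is_element_required_py, pvAlways, pvTriggers,
      h0, h1, h2, h3, h4, h5, h6, h7, h8, h9, h10, h11, h12,
      h7', h8', h9', h10', h11', h12']
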